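-- pv_equiv track=rewrite | github.com/HalisterFernando/computer-science | ALGORITMOS/DIA_2_RECURSIVIDADE_ESTRATEGIAS/exercicio_3.py | find_greatest_number_aux
-- ===== SOURCE A (Python) =====
-- def find_greatest_number_aux(list, len):
--     if len == 1:
--         return list[0]
--     else:
--         greatest_number = find_greatest_number_aux(list, len - 1)
--         if greatest_number > list[len - 1]:
--             return greatest_number
--         else:
--             return list[len - 1]
-- ===== SOURCE B (Python) =====
-- def find_greatest_number_aux(list, len):
--     return max(list[i] for i in range(len))
-- ===== Notes on version B (the rewrite author's own statement) =====
-- stated objective: idiomatic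
-- what changed: Replaces the len-deep recursion (one Python call frame per element) with a single built-in max() over a generator of the first len elements.
import Mathlib
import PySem

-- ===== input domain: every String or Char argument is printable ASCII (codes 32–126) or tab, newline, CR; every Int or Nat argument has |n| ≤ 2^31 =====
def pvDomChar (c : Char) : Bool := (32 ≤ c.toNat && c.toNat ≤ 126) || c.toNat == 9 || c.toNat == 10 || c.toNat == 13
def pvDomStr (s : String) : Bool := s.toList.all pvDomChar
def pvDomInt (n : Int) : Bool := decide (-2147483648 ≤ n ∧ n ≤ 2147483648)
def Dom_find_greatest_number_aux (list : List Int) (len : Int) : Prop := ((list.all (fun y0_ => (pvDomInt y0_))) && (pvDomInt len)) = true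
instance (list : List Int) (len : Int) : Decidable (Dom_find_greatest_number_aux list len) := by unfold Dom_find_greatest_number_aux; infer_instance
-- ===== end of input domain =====

-- B replaces A's len-deep recursion by one call to max() over the first len elements (idiomatic, no deep call stack).

-- ===== PORT A =====
-- Literal port of the recursion; the 'len ≤ 1' guard only makes the definition total
-- (there Python A never returns: infinite recursion / IndexError, excluded by Pre_).
def find_greatest_number_aux (list : List Int) (len : Int) : Int :=
  if len = 1 then PySem.List.pyGetD list 0 0
  else if len ≤ 1 then 0
  else
    let greatest_number := find_greatest_number_aux list (len - 1)
    if greatest_number > PySem.List.pyGetD list (len - 1) 0 then greatest_number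
    else PySem.List.pyGetD list (len - 1) 0
termination_by len.toNat
decreasing_by omega

-- ===== PORT B =====
-- max(gen) over a nonempty iterable → PySem.List.max?; '.getD 0' only covers len ≤ 0, where Python max raises (outside Pre_).
def find_greatest_number_aux_alt (list : List Int) (len : Int) : Int :=
  (PySem.List.max? ((PySem.List.pyRange 0 len 1).map (fun i => PySem.List.pyGetD list i 0)) (fun y => y)).getD 0

-- ===== PRECONDITION & SPEC =====
-- A raises outside this: for len ≤ 0 it recurses forever (RecursionError), for len = 1 on an
-- empty list and for len > list.length it raises IndexError.
def Pre_find_greatest_number_aux (list : List Int) (len : Int) : Prop :=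
  1 ≤ len ∧ len ≤ (list.length : Int)
instance (list : List Int) (len : Int) : Decidable (Pre_find_greatest_number_aux list len) := by
  unfold Pre_find_greatest_number_aux; infer_instance

def pvWitness_find_greatest_number_aux : List Int × Int := ([3, 7, 5], 3)

def Spec_find_greatest_number_aux (list : List Int) (len : Int) (out : Int) : Prop := out = find_greatest_number_aux_alt list len
instance (list : List Int) (len : Int) (out : Int) : Decidable (Spec_find_greatest_number_aux list len out) := by unfold Spec_find_greatest_number_aux; infer_instance

-- ===== CLAIM (what is proved, stated in full; the proofs are below) =====
def Claim_equal_find_greatest_number_aux : Prop := ∀ (list : List Int) (len : Int), Dom_find_greatest_number_aux list len → Pre_find_greatest_number_aux list len → Spec_find_greatest_number_aux list len (find_greatest_number_aux list len)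

-- ===== LEMMAS AND PROOFS =====
lemma max_id_snoc (xs : List Int) (x m : Int)
    (h : PySem.List.max? xs (fun y => y) = some m) :
    PySem.List.max? (xs ++ [x]) (fun y => y) = some (max m x) := by
  cases xs with
  | nil =>
    have hm := PySem.List.max?_mem h
    simp at hm
  | cons a t =>
    rw [PySem.List.max?_id_cons] at h
    rw [List.cons_append, PySem.List.max?_id_cons, List.foldl_append]
    simp_all

lemma A_step (list : List Int) (n : Int) (h : 2 ≤ n) :
    find_greatest_number_aux list n =
      max (find_greatest_number_aux list (n - 1)) (PySem.List.pyGetD list (n - 1) 0) := by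
  rw [find_greatest_number_aux]
  rw [if_neg (by omega), if_neg (by omega)]
  by_cases hle : find_greatest_number_aux list (n - 1) ≤ PySem.List.pyGetD list (n - 1) 0
  · rw [if_neg (by omega), max_eq_right hle]
  · rw [if_pos (by omega), max_eq_left (by omega)]

lemma alt_some (list : List Int) (len : Int) (h1 : 1 ≤ len) :
    PySem.List.max? ((PySem.List.pyRange 0 len 1).map (fun i => PySem.List.pyGetD list i 0)) (fun y => y)
      = some (find_greatest_number_aux list len) := by
  induction len, h1 using Int.le_induction with
  | base =>
    rw [PySem.List.pyRange_one_cons (by omega), PySem.List.pyRange_one_eq_nil (by omega)]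
    unfold find_greatest_number_aux
    simp [PySem.List.max?_id_cons]
  | succ n hn ih =>
    rw [PySem.List.pyRange_one_succ_right (by omega), List.map_append, List.map_singleton,
        max_id_snoc _ _ _ ih, A_step list (n + 1) (by omega)]
    have hsub : n + 1 - 1 = n := by omega
    rw [hsub]

lemma AB_eq (list : List Int) (len : Int) (h1 : 1 ≤ len) :
    find_greatest_number_aux list len = find_greatest_number_aux_alt list len := by
  unfold find_greatest_number_aux_alt
  rw [alt_some list len h1]
  rfl

-- ===== VERDICT (by name: the statement is the Claim_ definition above) =====
theorem find_greatest_number_aux_spec : Claim_equal_find_greatest_number_aux := by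
  intro list len _ hpre
  exact AB_eq list len hpre.1
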